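-- pv_equiv track=rewrite | github.com/chaney1475/Coding-Test | 백준/Bronze/8958. OX퀴즈/OX퀴즈.py | check
-- ===== SOURCE A (Python) =====
-- def check(S):
--     total = 0
--     cnt = 1
--     for s in S:
--         if s == 'O':
--             total += cnt
--             cnt += 1
--         else:
--             cnt = 1
--
--     return total
-- ===== SOURCE B (Python) =====
-- def check(S):
--     total = 0
--     i = 0
--     n = len(S)
--     while i < n:
--         if S[i] == 'O':
--             j = i
--             while j < n and S[j] == 'O':
--                 j += 1
--             L = j - i
--             total += L * (L + 1) // 2
--             i = j
--         else:
--             i += 1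
--     return total
-- ===== Notes on version B (the rewrite author's own statement) =====
-- stated objective: alternative
-- what changed: B segments the string into maximal runs of the scoring character and adds the closed-form triangular number L*(L+1)//2 per run, instead of A's per-character incremental streak counter.
import Mathlib
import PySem

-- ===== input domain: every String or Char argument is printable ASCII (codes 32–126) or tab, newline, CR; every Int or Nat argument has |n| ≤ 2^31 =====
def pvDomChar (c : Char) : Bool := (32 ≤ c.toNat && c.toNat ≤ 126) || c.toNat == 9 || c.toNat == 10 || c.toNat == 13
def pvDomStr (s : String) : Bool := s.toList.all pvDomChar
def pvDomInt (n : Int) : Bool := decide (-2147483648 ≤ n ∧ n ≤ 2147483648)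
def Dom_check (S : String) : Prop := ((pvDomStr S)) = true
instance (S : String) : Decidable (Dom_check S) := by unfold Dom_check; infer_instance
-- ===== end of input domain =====

-- B replaces A's per-character streak counter with run segmentation plus a closed-form
-- triangular sum per maximal 'O' run; same O(n) cost, alternative decomposition.

-- ===== PORT A =====
-- for s in S: if s == 'O': total += cnt; cnt += 1 else: cnt = 1
def checkStep (p : Int × Int) (s : Char) : Int × Int :=
  if s = 'O' then (p.1 + p.2, p.2 + 1) else (p.1, 1)

def check (S : String) : Int :=
  (S.toList.foldl checkStep (0, 1)).1

-- ===== PORT B =====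
-- outer loop: advance one char on non-'O'; on 'O' scan the whole maximal run (inner while),
-- add L*(L+1)//2 and continue after the run
def checkAltGo : List Char → Int
  | [] => 0
  | c :: rest =>
    if c = 'O' then
      -- inner while: j scans the maximal run; L = j - i = 1 + |takeWhile rest|
      PySem.Int.floordiv (((1 + (rest.takeWhile (· = 'O')).length : Nat) : Int)
          * (((1 + (rest.takeWhile (· = 'O')).length : Nat) : Int) + 1)) 2
        + checkAltGo (rest.dropWhile (· = 'O'))
    else
      checkAltGo rest
termination_by l => l.length
decreasing_by
  all_goals simp [List.length_dropWhile_le]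

def check_alt (S : String) : Int := checkAltGo S.toList

-- ===== PRECONDITION & SPEC =====
def Spec_check (S : String) (out : Int) : Prop := out = check_alt S
instance (S : String) (out : Int) : Decidable (Spec_check S out) := by unfold Spec_check; infer_instance

-- ===== CLAIM (what is proved, stated in full; the proofs are below) =====
def Claim_equal_check : Prop := ∀ (S : String), Dom_check S → Spec_check S (check S)

-- ===== LEMMAS AND PROOFS =====

theorem checkStep_fst_add (l : List Char) (t c : Int) :
    (l.foldl checkStep (t, c)).1 = t + (l.foldl checkStep (0, c)).1 := by
  induction l generalizing t c with
  | nil => simp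
  | cons x xs ih =>
    simp only [List.foldl_cons, checkStep]
    split_ifs
    · rw [ih, ih (0 + c)]; ring
    · rw [ih]

-- fold over a run of k 'O's starting with counter c contributes c + (c+1) + … + (c+k-1)
theorem checkStep_replicate (k : Nat) (r : List Char) (c : Int) :
    ((List.replicate k 'O' ++ r).foldl checkStep (0, c)).1
      = (Finset.range k).sum (fun i => c + i) + (r.foldl checkStep (0, c + k)).1 := by
  induction k generalizing c with
  | zero => simp
  | succ k ih =>
    rw [List.replicate_succ, List.cons_append, List.foldl_cons]
    have hstep : checkStep (0, c) 'O' = (0 + c, c + 1) := by simp [checkStep]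
    rw [hstep, checkStep_fst_add, ih (c + 1)]
    rw [Finset.sum_range_succ' (fun i => c + i)]
    push_cast
    ring_nf

theorem sum_range_tri (k : Nat) :
    (Finset.range k).sum (fun i => (1 : Int) + i)
      = PySem.Int.floordiv (((k : Int)) * ((k : Int) + 1)) 2 := by
  rw [PySem.Int.floordiv_eq_ediv_of_pos (by norm_num)]
  induction k with
  | zero => simp
  | succ k ih =>
    rw [Finset.sum_range_succ, ih]
    obtain ⟨m, hm⟩ := Int.even_mul_succ_self (k:Int)
    obtain ⟨m', hm'⟩ := Int.even_mul_succ_self ((k:Int) + 1)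
    push_cast
    rw [hm, hm', ← two_mul, ← two_mul m']
    rw [Int.mul_ediv_cancel_left _ (by norm_num), Int.mul_ediv_cancel_left _ (by norm_num)]
    have hexp : ((k:Int) + 1) * ((k:Int) + 1 + 1) = (k:Int) * ((k:Int) + 1) + 2 * ((k:Int) + 1) := by ring
    linarith [hm, hm', hexp]

theorem takeWhile_O_replicate (l : List Char) :
    l.takeWhile (· = 'O') = List.replicate (l.takeWhile (· = 'O')).length 'O' := by
  apply List.eq_replicate_of_mem
  intro b hb
  have := List.mem_takeWhile_imp hb
  simpa using this

theorem head_dropWhile_ne (l : List Char) (c : Char) (r : List Char)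
    (h : l.dropWhile (· = 'O') = c :: r) : ¬ c = 'O' := by
  have := List.head?_dropWhile_not (· = 'O') l
  rw [h] at this
  simpa using this

theorem checkAltGo_eq (l : List Char) :
    checkAltGo l = (l.foldl checkStep (0, 1)).1 := by
  induction l using checkAltGo.induct with
  | case1 => simp [checkAltGo]
  | case2 rest ih =>
    rw [checkAltGo, if_pos rfl]
    have hdecomp : ('O' :: rest : List Char)
        = List.replicate ((rest.takeWhile (· = 'O')).length + 1) 'O'
            ++ rest.dropWhile (· = 'O') := by
      conv_lhs => rw [← List.takeWhile_append_dropWhile (p := (· = 'O')) (l := 'O' :: rest)]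
      have h1 : ('O' :: rest : List Char).takeWhile (· = 'O') = 'O' :: rest.takeWhile (· = 'O') := by
        simp
      have h2 : ('O' :: rest : List Char).dropWhile (· = 'O') = rest.dropWhile (· = 'O') := by
        simp
      rw [h1, h2, List.replicate_succ, List.cons_append, ← takeWhile_O_replicate rest]
      simp
    rw [hdecomp, checkStep_replicate]
    have hrest : ∀ c : Int,
        ((rest.dropWhile (· = 'O')).foldl checkStep (0, c)).1
          = ((rest.dropWhile (· = 'O')).foldl checkStep (0, 1)).1 := by
      intro c
      cases hd : rest.dropWhile (· = 'O') with
      | nil => simp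
      | cons x xs =>
        have hx : ¬ x = 'O' := head_dropWhile_ne rest x xs hd
        simp only [List.foldl_cons, checkStep, if_neg hx]
    rw [hrest, ← ih, ← sum_range_tri, Nat.add_comm 1 (rest.takeWhile (· = 'O')).length]
  | case3 c rest hc ih =>
    rw [checkAltGo, if_neg hc]
    simp only [List.foldl_cons, checkStep, if_neg hc]
    exact ih

-- ===== VERDICT (by name: the statement is the Claim_ definition above) =====
theorem check_spec : Claim_equal_check := by
  intro S _
  unfold Spec_check check check_alt
  exact (checkAltGo_eq S.toList).symm
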